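-- pv_equiv track=rewrite | github.com/LucasCallamullo/Clases-Particulares | Trabajos Practicos y DESAFIOS/TRABAJO PRACTICO 2/main_2.py | obtener_hc_sc
-- ===== SOURCE A (Python) =====
-- def obtener_hc_sc(linea):
--     has_h = False
--     has_s = False
--
--     for i in linea:
--         car = i.lower()
--         # caso de obtener HC
--         if car == "h":
--             has_h = True
--         # caso de obtener SC
--         elif car == "s":
--             has_s = True
--
--         elif car == "c" and has_h:
--             return True
--
--         elif car == "c" and has_s:
--             return False
--
--         else:
--             has_h = False
--             has_s = False
--
--     return False
-- ===== SOURCE B (Python) =====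
-- def obtener_hc_sc(linea):
--     # Run-based scan: lower once, skip to each maximal h/s run, decide at the
--     # character right after the run.
--     s = linea.lower()
--     while s:
--         if s[0] in 'hs':
--             run = 1
--             while run < len(s) and s[run] in 'hs':
--                 run += 1
--             if run < len(s) and s[run] == 'c':
--                 return 'h' in s[:run]
--             s = s[run+1:]
--         else:
--             s = s[1:]
--     return False
-- ===== Notes on version B (the rewrite author's own statement) =====
-- stated objective: alternative
-- what changed: A's per-character two-flag state machine is replaced by a run-based scan: lower the string once, jump to each maximal h/s run, and decide at the character right after it ('h' in the run => True, otherwise False).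
import Mathlib
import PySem

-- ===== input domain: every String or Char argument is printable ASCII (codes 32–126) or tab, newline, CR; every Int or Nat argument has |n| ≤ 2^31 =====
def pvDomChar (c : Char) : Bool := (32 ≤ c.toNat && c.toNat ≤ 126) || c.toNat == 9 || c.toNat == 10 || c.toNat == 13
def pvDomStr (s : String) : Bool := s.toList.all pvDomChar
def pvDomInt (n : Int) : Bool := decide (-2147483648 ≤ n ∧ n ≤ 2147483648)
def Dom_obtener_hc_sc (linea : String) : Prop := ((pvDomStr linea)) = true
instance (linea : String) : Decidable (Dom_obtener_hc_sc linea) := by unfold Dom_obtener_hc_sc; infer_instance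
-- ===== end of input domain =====

-- B replaces A's per-character flag state machine by a run-based scan (lower once,
-- jump over each maximal h/s run, decide at the character after it); objective: alternative.

-- ===== PORT A =====
-- the for-loop over the characters, with the two flags as state; early `return` = stop
def pvGoA : List Char → Bool → Bool → Bool
  | [], _, _ => false
  | i :: rest, has_h, has_s =>
    let car := PySem.Chars.lowerChar i      -- i.lower() (exact on the ASCII domain)
    if car = 'h' then pvGoA rest true has_s
    else if car = 's' then pvGoA rest has_h true
    else if car = 'c' ∧ has_h = true then true
    else if car = 'c' ∧ has_s = true then false
    else pvGoA rest false false

def obtener_hc_sc (linea : String) : Bool := pvGoA linea.toList false false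

-- ===== PORT B =====
-- inner while of Source B: number of consecutive h/s chars from the start (s[run] in 'hs')
def pvRunLen : List Char → Nat
  | [] => 0
  | c :: r => if c = 'h' ∨ c = 's' then pvRunLen r + 1 else 0

-- outer while of Source B over the shrinking suffix s; `(s.drop run).head? = some 'c'`
-- is `run < len(s) and s[run] == 'c'`, `contains 'h'` is `'h' in s[:run]`
def pvGoB : List Char → Bool
  | [] => false
  | c :: rest =>
    if c = 'h' ∨ c = 's' then
      let run := 1 + pvRunLen rest
      if ((c :: rest).drop run).head? = some 'c' then
        ((c :: rest).take run).contains 'h'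
      else
        pvGoB ((c :: rest).drop (run + 1))
    else
      pvGoB rest
termination_by s => s.length
decreasing_by
  · simp only [List.length_drop, List.length_cons]; omega
  · simp only [List.length_cons]; omega

def obtener_hc_sc_alt (linea : String) : Bool :=
  pvGoB (PySem.Str.lower linea).toList    -- s = linea.lower(), scanned as its char list

-- ===== PRECONDITION & SPEC =====
def Spec_obtener_hc_sc (linea : String) (out : Bool) : Prop := out = obtener_hc_sc_alt linea
instance (linea : String) (out : Bool) : Decidable (Spec_obtener_hc_sc linea out) := by unfold Spec_obtener_hc_sc; infer_instance

-- ===== CLAIM (what is proved, stated in full; the proofs are below) =====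
def Claim_equal_obtener_hc_sc : Prop := ∀ (linea : String), Dom_obtener_hc_sc linea → Spec_obtener_hc_sc linea (obtener_hc_sc linea)

-- ===== LEMMAS AND PROOFS =====

-- the character predicate "lowercases to h or s"
def pvHS (c : Char) : Bool := decide (PySem.Chars.lowerChar c = 'h' ∨ PySem.Chars.lowerChar c = 's')

theorem pvRunLen_eq (run rem : List Char)
    (hrun : ∀ c ∈ run, c = 'h' ∨ c = 's')
    (hrem : ∀ d, rem.head? = some d → ¬(d = 'h' ∨ d = 's')) :
    pvRunLen (run ++ rem) = run.length := by
  induction run with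
  | nil =>
    cases rem with
    | nil => simp [pvRunLen]
    | cons d r =>
      have := hrem d (by simp)
      simp [pvRunLen, this]
  | cons c r ih =>
    have hc := hrun c (by simp)
    have := ih (fun x hx => hrun x (by simp [hx]))
    simp [pvRunLen, hc, this]

theorem pvGoA_run (run : List Char) (hrun : ∀ c ∈ run, pvHS c = true) :
    ∀ (rem : List Char) (h s : Bool),
    pvGoA (run ++ rem) h s =
      pvGoA rem (h || run.any (fun c => PySem.Chars.lowerChar c == 'h'))
                (s || run.any (fun c => PySem.Chars.lowerChar c == 's')) := by
  induction run with
  | nil => simp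
  | cons c r ih =>
    intro rem h s
    have hc := hrun c (by simp)
    have ih' := ih (fun x hx => hrun x (by simp [hx]))
    simp only [pvHS, decide_eq_true_eq] at hc
    simp only [List.cons_append, pvGoA, List.any_cons]
    rcases hc with hc | hc
    · rw [hc]
      simp [ih', Bool.or_left_comm]
    · have hns : PySem.Chars.lowerChar c ≠ 'h' := by rw [hc]; decide
      rw [hc]
      simp [hns, ih', Bool.or_left_comm]

-- head of dropWhile fails the predicate
theorem pvHead_dropWhile (p : Char → Bool) (l : List Char) :
    ∀ d, (l.dropWhile p).head? = some d → p d = false := by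
  induction l with
  | nil => intro d h; simp [List.dropWhile] at h
  | cons c r ih =>
    intro d h
    by_cases hc : p c = true
    · rw [List.dropWhile_cons_of_pos hc] at h
      exact ih d h
    · rw [List.dropWhile_cons_of_neg hc] at h
      simp at h
      subst h
      simpa using hc

theorem pvContainsMapAny (f : Char → Char) (l : List Char) (a : Char) :
    (l.map f).contains a = l.any (fun c => f c == a) := by
  induction l with
  | nil => rfl
  | cons c r ih =>
    simp only [List.map_cons, List.contains_cons, List.any_cons, ih]
    have hflip : (a == f c) = (f c == a) := by
      by_cases h : a = f c
      · subst h; rfl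
      · rw [beq_eq_false_iff_ne.mpr h, beq_eq_false_iff_ne.mpr (fun hh => h hh.symm)]
    rw [hflip]

theorem pvMainEq : ∀ (n : Nat) (l : List Char), l.length ≤ n →
    pvGoA l false false = pvGoB (l.map PySem.Chars.lowerChar) := by
  intro n
  induction n with
  | zero =>
    intro l hl
    have : l = [] := List.eq_nil_of_length_eq_zero (by omega)
    subst this
    simp [pvGoA, pvGoB]
  | succ n ih =>
    intro l hl
    cases l with
    | nil => simp [pvGoA, pvGoB]
    | cons x r =>
      by_cases hx : pvHS x = true
      · -- x starts a maximal h/s run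
        have hx' : PySem.Chars.lowerChar x = 'h' ∨ PySem.Chars.lowerChar x = 's' := by
          simpa [pvHS] using hx
        have hrun0 : (x :: r).takeWhile pvHS = x :: r.takeWhile pvHS :=
          List.takeWhile_cons_of_pos hx
        have hrem0 : (x :: r).dropWhile pvHS = r.dropWhile pvHS :=
          List.dropWhile_cons_of_pos hx
        set run := (x :: r).takeWhile pvHS with hrundef
        set rem := (x :: r).dropWhile pvHS with hremdef
        have hsplit : run ++ rem = x :: r := List.takeWhile_append_dropWhile
        have hrunmem : ∀ c ∈ run, pvHS c = true := fun c hc => List.mem_takeWhile_imp hc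
        -- A side: consume the run, accumulating the two flags
        have hA : pvGoA (x :: r) false false =
            pvGoA rem (run.any (fun c => PySem.Chars.lowerChar c == 'h'))
                      (run.any (fun c => PySem.Chars.lowerChar c == 's')) := by
          rw [← hsplit, pvGoA_run run hrunmem]; simp
        -- B side: the inner while counts exactly the run
        have hlen : pvRunLen (r.map PySem.Chars.lowerChar) =
            (r.takeWhile pvHS).length := by
          have : r.map PySem.Chars.lowerChar =
              (r.takeWhile pvHS).map PySem.Chars.lowerChar ++
              (r.dropWhile pvHS).map PySem.Chars.lowerChar := by
            rw [← List.map_append, List.takeWhile_append_dropWhile]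
          rw [this, pvRunLen_eq]
          · simp
          · intro c hc
            rcases List.mem_map.mp hc with ⟨c0, hc0, rfl⟩
            simpa [pvHS] using List.mem_takeWhile_imp hc0
          · intro d hd
            rw [List.head?_map] at hd
            cases hd0 : (r.dropWhile pvHS).head? with
            | none => rw [hd0] at hd; simp at hd
            | some d0 =>
              rw [hd0] at hd
              simp at hd
              subst hd
              have := pvHead_dropWhile pvHS r d0 hd0
              simpa [pvHS] using this
        have hmap : (x :: r).map PySem.Chars.lowerChar =
            run.map PySem.Chars.lowerChar ++ rem.map PySem.Chars.lowerChar := by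
          rw [← List.map_append, hsplit]
        have hrunlen : 1 + pvRunLen (r.map PySem.Chars.lowerChar) = run.length := by
          rw [hlen, hrun0]; simp; omega
        have hdropB : ((x :: r).map PySem.Chars.lowerChar).drop run.length =
            rem.map PySem.Chars.lowerChar := by
          rw [hmap]
          have : run.length = (run.map PySem.Chars.lowerChar).length := by simp
          rw [this, List.drop_left]
        have htakeB : ((x :: r).map PySem.Chars.lowerChar).take run.length =
            run.map PySem.Chars.lowerChar := by
          rw [hmap]
          have : run.length = (run.map PySem.Chars.lowerChar).length := by simp
          rw [this, List.take_left]
        -- unfold one step of pvGoB on the mapped list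
        have hcondB : (PySem.Chars.lowerChar x = 'h' ∨ PySem.Chars.lowerChar x = 's') := hx'
        have hB : pvGoB ((x :: r).map PySem.Chars.lowerChar) =
            if ((rem.map PySem.Chars.lowerChar).head? = some 'c') then
              (run.map PySem.Chars.lowerChar).contains 'h'
            else
              pvGoB ((rem.map PySem.Chars.lowerChar).drop 1) := by
          rw [show (x :: r).map PySem.Chars.lowerChar =
                PySem.Chars.lowerChar x :: r.map PySem.Chars.lowerChar from rfl]
          rw [pvGoB]
          simp only [hcondB, if_true, hrunlen]
          rw [show (PySem.Chars.lowerChar x :: r.map PySem.Chars.lowerChar) =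
                (x :: r).map PySem.Chars.lowerChar from rfl]
          rw [hdropB, htakeB]
          congr 1
          rw [← List.drop_drop, hdropB]
        -- length bookkeeping
        have hlensplit : run.length + rem.length = r.length + 1 := by
          have := congrArg List.length hsplit
          simpa using this
        have hrunpos : 1 ≤ run.length := by rw [hrun0]; simp
        cases hremc : rem with
        | nil =>
          rw [hA, hremc]
          rw [hB, hremc]
          simp [pvGoA, pvGoB]
        | cons y rest =>
          have hy : pvHS y = false := by
            apply pvHead_dropWhile pvHS (x :: r) y
            rw [← hremdef, hremc]; rfl
          have hyh : PySem.Chars.lowerChar y ≠ 'h' := by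
            intro h; rw [pvHS, h] at hy; simp at hy
          have hys : PySem.Chars.lowerChar y ≠ 's' := by
            intro h; rw [pvHS, h] at hy; simp at hy
          by_cases hyc : PySem.Chars.lowerChar y = 'c'
          · -- decisive character: both sides answer "run contains an h"
            rw [hA, hremc, hB, hremc]
            simp only [List.map_cons, List.head?_cons, hyc, if_true]
            have hBval : (run.map PySem.Chars.lowerChar).contains 'h' =
                run.any (fun c => PySem.Chars.lowerChar c == 'h') := by
              exact pvContainsMapAny _ _ _
            rw [hBval]
            by_cases hH : run.any (fun c => PySem.Chars.lowerChar c == 'h') = true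
            · rw [hH]
              simp [pvGoA, hyc]
            · have hS : run.any (fun c => PySem.Chars.lowerChar c == 's') = true := by
                have hxmem : x ∈ run := by rw [hrun0]; simp
                rcases hx' with h1 | h1
                · exfalso; apply hH; exact List.any_eq_true.mpr ⟨x, hxmem, by simp [h1]⟩
                · exact List.any_eq_true.mpr ⟨x, hxmem, by simp [h1]⟩
              rw [Bool.not_eq_true] at hH
              rw [hH]
              simp [pvGoA, hyc, hS]
          · -- run not followed by c: both sides reset and continue after y
            rw [hA, hremc, hB, hremc]
            simp only [List.map_cons, List.head?_cons]
            rw [if_neg (by simp [hyc])]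
            have hAstep : ∀ hh ss, pvGoA (y :: rest) hh ss = pvGoA rest false false := by
              intro hh ss
              simp [pvGoA, hyh, hys, hyc]
            rw [hAstep]
            simp only [List.drop_succ_cons, List.drop_zero]
            apply ih
            have : rem.length = rest.length + 1 := by rw [hremc]; simp
            simp only [List.length_cons] at hl
            omega
      · -- x is not h/s: both sides skip it (flags reset / outer while advances by one)
        have hxh : PySem.Chars.lowerChar x ≠ 'h' := by
          intro h; rw [pvHS, h] at hx; simp at hx
        have hxs : PySem.Chars.lowerChar x ≠ 's' := by
          intro h; rw [pvHS, h] at hx; simp at hx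
        have hA : pvGoA (x :: r) false false = pvGoA r false false := by
          simp [pvGoA, hxh, hxs]
        have hB : pvGoB ((x :: r).map PySem.Chars.lowerChar) =
            pvGoB (r.map PySem.Chars.lowerChar) := by
          rw [show (x :: r).map PySem.Chars.lowerChar =
                PySem.Chars.lowerChar x :: r.map PySem.Chars.lowerChar from rfl]
          rw [pvGoB]
          rw [if_neg (by tauto)]
        rw [hA, hB]
        apply ih
        simp only [List.length_cons] at hl
        omega

-- ===== VERDICT (by name: the statement is the Claim_ definition above) =====
theorem obtener_hc_sc_spec : Claim_equal_obtener_hc_sc := by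
  intro linea _
  unfold Spec_obtener_hc_sc obtener_hc_sc obtener_hc_sc_alt
  have : (PySem.Str.lower linea).toList = linea.toList.map PySem.Chars.lowerChar := by
    rw [PySem.Str.toList_lower]; rfl
  rw [this]
  exact pvMainEq linea.toList.length linea.toList (le_refl _)
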